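-- pv_equiv track=rewrite | github.com/daveogle85/adventOfC0de2025 | app/days/day03.py | part1
-- ===== SOURCE A (Python) =====
-- def part1(puzzle_input: str):
--     result = 0
--     if not puzzle_input:
--         return 0
--     for line in puzzle_input.splitlines():
--         stripped_line = line.strip()
--         if not stripped_line:
--             continue
--         result += int(find_largest_number_from_string(stripped_line, 2))
--     return result
--
-- def find_largest_number_from_string(bank: str, choices: int) -> str:
--     current_index = 0
--     result: list[str] = []
--     for choice in range(choices):
--         available_choices = bank[current_index : len(bank) - (choices - 1 - choice)]
--         if not available_choices:
--             break
--         largest_int_index = available_choices.index(max(available_choices))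
--         result.append(available_choices[largest_int_index])
--         current_index += largest_int_index + 1
--
--     return "".join(result) if result else "0"
-- ===== SOURCE B (Python) =====
-- def part1(puzzle_input: str):
--     total = 0
--     for line in puzzle_input.splitlines():
--         s = line.strip()
--         if len(s) < 2:
--             continue
--         total += max(int(s[i]) * 10 + int(s[j])
--                      for i in range(len(s)) for j in range(i + 1, len(s)))
--     return total
-- ===== Notes on version B (the rewrite author's own statement) =====
-- stated objective: alternative
-- what changed: A greedily picks the max character of line[0:n-1] and then the max character after it; B instead brute-forces all ordered index pairs (i,j), i<j, taking the maximum of int(s[i])*10+int(s[j]) per line, replacing the greedy two-step selection by a quadratic pair scan with per-character arithmetic.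
-- outside the precondition, e.g. on part1('+5'): A returns 5, B raises ValueError; on part1('1 2'): A returns 12, B raises ValueError
import Mathlib
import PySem

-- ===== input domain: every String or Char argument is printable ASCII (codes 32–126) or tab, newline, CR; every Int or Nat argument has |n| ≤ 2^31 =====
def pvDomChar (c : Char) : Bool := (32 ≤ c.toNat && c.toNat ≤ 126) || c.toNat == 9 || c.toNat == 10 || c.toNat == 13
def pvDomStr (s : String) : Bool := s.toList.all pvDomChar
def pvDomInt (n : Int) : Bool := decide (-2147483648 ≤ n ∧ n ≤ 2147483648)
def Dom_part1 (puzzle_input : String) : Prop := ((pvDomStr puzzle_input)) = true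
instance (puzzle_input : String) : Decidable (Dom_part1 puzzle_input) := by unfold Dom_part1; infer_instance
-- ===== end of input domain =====

-- B replaces A's greedy two-step character picking per line by a brute-force maximum over all
-- ordered index pairs, converting each picked pair arithmetically (objective: alternative).

-- ===== PORT A =====
-- the loop 'for choice in range(choices)' of find_largest_number_from_string, with state
-- (current_index, result); 'if not available_choices: break' is rendered as max? returning none
-- exactly on the empty list (both stop the loop there)
def pvFlnLoop (bank : List Char) (choices : Int) :
    List Int → Int × List Char → Int × List Char
  | [], st => st
  | choice :: rest, (ci, result) =>
      let avail := PySem.List.slice bank (some ci)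
        (some ((bank.length : Int) - (choices - 1 - choice)))
      match PySem.List.max? avail (fun c => c) with
      | none => (ci, result)    -- available_choices empty: break
      | some m =>
          let li : Nat := (PySem.List.index? avail m).getD 0   -- .index never fails: m ∈ avail
          pvFlnLoop bank choices rest
            (ci + (li : Int) + 1, result ++ [(PySem.List.pyGet? avail (li : Int)).getD ' '])

def pvFindLargest (bank : List Char) (choices : Int) : String :=
  let st := pvFlnLoop bank choices (PySem.List.pyRange 0 choices 1) (0, [])
  if st.2 = [] then "0" else String.ofList st.2

def part1 (puzzle_input : String) : Int :=
  if puzzle_input = "" then 0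
  else
    (PySem.Str.splitlines puzzle_input).foldl (fun result line =>
      let stripped := PySem.Str.strip line
      if stripped = "" then result
      else result + (PySem.Int.ofStr? (pvFindLargest stripped.toList 2)).getD 0) 0

-- ===== PORT B =====
-- int(s[i]) for a loop index i (always in range; ofChars? none = ValueError, outside Pre_)
def pvChAt (s : List Char) (i : Int) : Int :=
  (PySem.Int.ofChars? [(PySem.List.pyGet? s i).getD ' ']).getD 0

-- the generator (int(s[i])*10 + int(s[j]) for i in range(len(s)) for j in range(i+1, len(s)))
def pvPairVals (s : List Char) : List Int :=
  (PySem.List.pyRange 0 (s.length : Int) 1).flatMap (fun i =>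
    (PySem.List.pyRange (i + 1) (s.length : Int) 1).map (fun j =>
      pvChAt s i * 10 + pvChAt s j))

def part1_alt (puzzle_input : String) : Int :=
  (PySem.Str.splitlines puzzle_input).foldl (fun total line =>
    let s := (PySem.Str.strip line).toList
    if s.length < 2 then total
    else total + (PySem.List.max? (pvPairVals s) (fun v => v)).getD 0) 0

-- ===== PRECONDITION & SPEC =====
-- Pre_ excludes inputs with a stripped line of length ≥ 2 that is not all ASCII digits: on most
-- of those A's int() raises ValueError; on the few where the greedy pick still parses (e.g. "+5")
-- B's per-character int() raises instead.
def Pre_part1 (puzzle_input : String) : Prop :=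
  ((PySem.Str.splitlines puzzle_input).all (fun line =>
    decide ((PySem.Str.strip line).toList.length ≤ 1) ||
      (PySem.Str.strip line).toList.all Char.isDigit)) = true
instance (puzzle_input : String) : Decidable (Pre_part1 puzzle_input) := by
  unfold Pre_part1; infer_instance

def pvWitness_part1 : String := "95\n 7 \n318"

def Spec_part1 (puzzle_input : String) (out : Int) : Prop := out = part1_alt puzzle_input
instance (puzzle_input : String) (out : Int) : Decidable (Spec_part1 puzzle_input out) := by unfold Spec_part1; infer_instance

-- ===== CLAIM (what is proved, stated in full; the proofs are below) =====
def Claim_equal_part1 : Prop := ∀ (puzzle_input : String), Dom_part1 puzzle_input → Pre_part1 puzzle_input → Spec_part1 puzzle_input (part1 puzzle_input)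

-- ===== LEMMAS AND PROOFS =====

theorem pvWitness_ok : Dom_part1 pvWitness_part1 ∧ Pre_part1 pvWitness_part1 := by decide

-- character order and digit arithmetic
theorem pvCharLe (a b : Char) : a ≤ b ↔ a.toNat ≤ b.toNat := by
  rw [Char.le_def, UInt32.le_iff_toNat_le]; rfl

theorem pvCharEq (a b : Char) (h : a.toNat = b.toNat) : a = b :=
  Char.ext (UInt32.toNat_inj.mp h)

theorem pvDigitBounds (c : Char) (h : c.isDigit = true) : 48 ≤ c.toNat ∧ c.toNat ≤ 57 := by
  simp [Char.isDigit, UInt32.le_iff_toNat_le] at h; exact ⟨h.1, h.2⟩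

theorem pvOfChars1 (c : Char) (h : c.isDigit = true) :
    PySem.Int.ofChars? [c] = some ((c.toNat : Int) - 48) := by
  obtain ⟨h1, h2⟩ := pvDigitBounds c h
  rw [(Char.ofNat_toNat c).symm]
  interval_cases h : c.toNat <;> decide

theorem pvOfChars2 (a b : Char) (ha : a.isDigit = true) (hb : b.isDigit = true) :
    PySem.Int.ofChars? [a, b] =
      some (10 * ((a.toNat : Int) - 48) + ((b.toNat : Int) - 48)) := by
  obtain ⟨ha1, ha2⟩ := pvDigitBounds a ha
  obtain ⟨hb1, hb2⟩ := pvDigitBounds b hb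
  rw [(Char.ofNat_toNat a).symm, (Char.ofNat_toNat b).symm]
  interval_cases h : a.toNat <;> interval_cases h2 : b.toNat <;> decide

-- slices as they occur in A's loop
theorem pvSliceDropLast (s : List Char) (h : 1 ≤ s.length) :
    PySem.List.slice s (some 0) (some ((s.length : Int) - 1)) = s.dropLast := by
  have he : ((s.length : Int) - 1) = ((s.length - 1 : Nat) : Int) := by omega
  rw [he, PySem.List.slice_zero_start, PySem.List.slice_to_natCast, List.dropLast_eq_take]

theorem pvSliceDrop (s : List Char) (k : Nat) :
    PySem.List.slice s (some (k : Int)) (some ((s.length : Int))) = s.drop k := by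
  rw [PySem.List.slice_natCast]
  exact List.take_of_length_le (by simp)

theorem pvSliceZero (l : List Char) : PySem.List.slice l none (some 0) = [] := by
  rw [show (some (0 : Int)) = some ((0 : Nat) : Int) from rfl, PySem.List.slice_to_natCast]
  simp

-- what A's greedy loop produces on a line of length ≥ 2
theorem pvGreedy (s : List Char) (hs : 2 ≤ s.length) :
    ∃ (m1 m2 : Char) (k1 : Nat) (hk1 : k1 + 1 ≤ s.length - 1),
      pvFindLargest s 2 = String.ofList [m1, m2] ∧
      s[k1]'(by omega) = m1 ∧
      (∀ j (hj : j < k1), s[j]'(by omega) ≠ m1) ∧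
      (∀ c ∈ s.dropLast, c ≤ m1) ∧
      m2 ∈ s.drop (k1 + 1) ∧
      (∀ c ∈ s.drop (k1 + 1), c ≤ m2) := by
  have hrange : PySem.List.pyRange 0 2 1 = [0, 1] := by decide
  -- first iteration
  have h1 : PySem.List.slice s (some 0) (some ((s.length : Int) - (2 - 1 - 0))) = s.dropLast := by
    norm_num; exact pvSliceDropLast s (by omega)
  have hne1 : s.dropLast ≠ [] := by
    intro h; have := congrArg List.length h; simp at this; omega
  rcases hmax1 : PySem.List.max? s.dropLast (fun c => c) with _ | m1
  · exact absurd ((PySem.List.max?_eq_none_iff _ _).mp hmax1) hne1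
  have hmem1 : m1 ∈ s.dropLast := PySem.List.max?_mem hmax1
  rcases hidx : PySem.List.index? s.dropLast m1 with _ | k1
  · rw [PySem.List.index?_eq_none_iff] at hidx; exact absurd hmem1 hidx
  obtain ⟨hk1, hget1, hmin1⟩ := PySem.List.getElem_of_index?_eq_some hidx
  have hk1' : k1 + 1 ≤ s.length - 1 := by simp at hk1; omega
  have hpg1 : (PySem.List.pyGet? s.dropLast (k1 : Int)).getD ' ' = m1 := by
    simp [List.getElem?_eq_getElem hk1, hget1]
  have e1 : pvFlnLoop s 2 [0, 1] (0, []) = pvFlnLoop s 2 [1] (0 + (k1 : Int) + 1, [m1]) := by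
    rw [show pvFlnLoop s 2 [0, 1] (0, []) =
        (match PySem.List.max?
            (PySem.List.slice s (some 0) (some ((s.length : Int) - (2 - 1 - 0)))) (fun c => c) with
        | none => ((0 : Int), ([] : List Char))
        | some m =>
            pvFlnLoop s 2 [1]
              (0 + ((PySem.List.index?
                  (PySem.List.slice s (some 0) (some ((s.length : Int) - (2 - 1 - 0)))) m).getD 0 : Nat) + 1,
               [] ++ [(PySem.List.pyGet?
                  (PySem.List.slice s (some 0) (some ((s.length : Int) - (2 - 1 - 0))))
                  (((PySem.List.index?
                    (PySem.List.slice s (some 0) (some ((s.length : Int) - (2 - 1 - 0)))) m).getD 0 : Nat) : Int)).getD ' '])) from rfl]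
    rw [h1, hmax1]
    simp only [hidx, Option.getD_some, List.nil_append, hpg1]
  -- second iteration
  have h2 : PySem.List.slice s (some (0 + (k1 : Int) + 1)) (some ((s.length : Int) - (2 - 1 - 1)))
      = s.drop (k1 + 1) := by
    have ha : (0 + (k1 : Int) + 1) = ((k1 + 1 : Nat) : Int) := by push_cast; ring
    have hb : ((s.length : Int) - (2 - 1 - 1)) = ((s.length : Int)) := by ring
    rw [ha, hb, pvSliceDrop]
  have hne2 : s.drop (k1 + 1) ≠ [] := by
    intro h; have := congrArg List.length h; simp at this; omega
  rcases hmax2 : PySem.List.max? (s.drop (k1 + 1)) (fun c => c) with _ | m2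
  · exact absurd ((PySem.List.max?_eq_none_iff _ _).mp hmax2) hne2
  have hmem2 : m2 ∈ s.drop (k1 + 1) := PySem.List.max?_mem hmax2
  rcases hidx2 : PySem.List.index? (s.drop (k1 + 1)) m2 with _ | k2
  · rw [PySem.List.index?_eq_none_iff] at hidx2; exact absurd hmem2 hidx2
  obtain ⟨hk2, hget2, _⟩ := PySem.List.getElem_of_index?_eq_some hidx2
  have hpg2 : (PySem.List.pyGet? (s.drop (k1 + 1)) (k2 : Int)).getD ' ' = m2 := by
    simp [List.getElem?_eq_getElem hk2, hget2]
  have e2 : pvFlnLoop s 2 [1] (0 + (k1 : Int) + 1, [m1])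
      = (0 + (k1 : Int) + 1 + (k2 : Int) + 1, [m1, m2]) := by
    rw [show pvFlnLoop s 2 [1] (0 + (k1 : Int) + 1, [m1]) =
        (match PySem.List.max?
            (PySem.List.slice s (some (0 + (k1 : Int) + 1)) (some ((s.length : Int) - (2 - 1 - 1)))) (fun c => c) with
        | none => ((0 + (k1 : Int) + 1), [m1])
        | some m =>
            pvFlnLoop s 2 []
              (0 + (k1 : Int) + 1 + ((PySem.List.index?
                  (PySem.List.slice s (some (0 + (k1 : Int) + 1)) (some ((s.length : Int) - (2 - 1 - 1)))) m).getD 0 : Nat) + 1,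
               [m1] ++ [(PySem.List.pyGet?
                  (PySem.List.slice s (some (0 + (k1 : Int) + 1)) (some ((s.length : Int) - (2 - 1 - 1))))
                  (((PySem.List.index?
                    (PySem.List.slice s (some (0 + (k1 : Int) + 1)) (some ((s.length : Int) - (2 - 1 - 1)))) m).getD 0 : Nat) : Int)).getD ' '])) from rfl]
    rw [h2, hmax2]
    simp only [hidx2, Option.getD_some, hpg2]
    rfl
  have hval : pvFindLargest s 2 = String.ofList [m1, m2] := by
    unfold pvFindLargest
    rw [hrange, e1, e2]
    rfl
  refine ⟨m1, m2, k1, hk1', hval, ?_, ?_, ?_, hmem2, ?_⟩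
  · rw [List.getElem_dropLast] at hget1
    exact hget1
  · intro j hj hcontra
    have hj' : j < s.dropLast.length := by simp; omega
    have h := hmin1 j hj
    rw [List.getElem_dropLast] at h
    exact h hcontra
  · exact fun c hc => PySem.List.max?_isMax hmax1 c hc
  · exact fun c hc => PySem.List.max?_isMax hmax2 c hc

-- evaluating B's per-character int() at an in-range index
theorem pvChAtEq (s : List Char) (i : Nat) (hi : i < s.length)
    (hdig : (s[i]'hi).isDigit = true) :
    pvChAt s (i : Int) = (((s[i]'hi).toNat : Int)) - 48 := by
  unfold pvChAt
  rw [PySem.List.pyGet?_natCast, List.getElem?_eq_getElem hi]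
  simp [pvOfChars1 _ hdig]

-- the greedy pair's value is attained by B's pair list
theorem pvAttained (s : List Char) (hd : ∀ c ∈ s, c.isDigit = true)
    (m1 m2 : Char) (k1 : Nat) (hk1 : k1 + 1 ≤ s.length - 1) (hs : 2 ≤ s.length)
    (hget1 : s[k1]'(by omega) = m1) (hmem2 : m2 ∈ s.drop (k1 + 1)) :
    ((m1.toNat : Int) - 48) * 10 + ((m2.toNat : Int) - 48) ∈ pvPairVals s := by
  obtain ⟨t, ht, hgt⟩ := List.getElem_of_mem hmem2
  have hlen : (s.drop (k1 + 1)).length = s.length - (k1 + 1) := by simp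
  have hj : k1 + 1 + t < s.length := by omega
  have hgt' : s[k1 + 1 + t]'hj = m2 := by
    rw [← hgt]; simp
  unfold pvPairVals
  rw [List.mem_flatMap]
  refine ⟨(k1 : Int), ?_, ?_⟩
  · rw [PySem.List.mem_pyRange_one]
    refine ⟨by positivity, by exact_mod_cast (by omega : k1 < s.length)⟩
  · rw [List.mem_map]
    refine ⟨((k1 + 1 + t : Nat) : Int), ?_, ?_⟩
    · rw [PySem.List.mem_pyRange_one]
      refine ⟨by push_cast; omega, by exact_mod_cast hj⟩
    · rw [pvChAtEq s k1 (by omega) (hd _ (List.getElem_mem _)),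
        pvChAtEq s (k1 + 1 + t) hj (hd _ (List.getElem_mem _)), hget1, hgt']

-- every pair value is bounded by the greedy pair's value
theorem pvBound (s : List Char) (hd : ∀ c ∈ s, c.isDigit = true)
    (m1 m2 : Char) (k1 : Nat) (hk1 : k1 + 1 ≤ s.length - 1) (hs : 2 ≤ s.length)
    (hget1 : s[k1]'(by omega) = m1)
    (hmin1 : ∀ j (hj : j < k1), s[j]'(by omega) ≠ m1)
    (hmax1 : ∀ c ∈ s.dropLast, c ≤ m1)
    (hmem2 : m2 ∈ s.drop (k1 + 1))
    (hmax2 : ∀ c ∈ s.drop (k1 + 1), c ≤ m2) :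
    ∀ x ∈ pvPairVals s, x ≤ ((m1.toNat : Int) - 48) * 10 + ((m2.toNat : Int) - 48) := by
  intro x hx
  unfold pvPairVals at hx
  rw [List.mem_flatMap] at hx
  obtain ⟨i, hi, hx⟩ := hx
  rw [PySem.List.mem_pyRange_one] at hi
  rw [List.mem_map] at hx
  obtain ⟨j, hj, hx⟩ := hx
  rw [PySem.List.mem_pyRange_one] at hj
  obtain ⟨i, rfl⟩ : ∃ n : Nat, i = (n : Int) := ⟨i.toNat, by omega⟩
  obtain ⟨j, rfl⟩ : ∃ n : Nat, j = (n : Int) := ⟨j.toNat, by omega⟩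
  have hiltj : i < j := by omega
  have hjlt : j < s.length := by exact_mod_cast hj.2
  have hilt : i < s.length := by omega
  have hdi := hd _ (List.getElem_mem hilt)
  have hdj := hd _ (List.getElem_mem hjlt)
  rw [pvChAtEq s i hilt hdi, pvChAtEq s j hjlt hdj] at hx
  subst hx
  have hidrop : s[i]'hilt ∈ s.dropLast := by
    have hi' : i < s.dropLast.length := by simp; omega
    have h : s.dropLast[i]'hi' ∈ s.dropLast := List.getElem_mem hi'
    rw [List.getElem_dropLast] at h
    exact h
  have hile : (s[i]'hilt).toNat ≤ m1.toNat := (pvCharLe _ _).mp (hmax1 _ hidrop)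
  have b1 := pvDigitBounds _ hdi
  have b2 := pvDigitBounds _ hdj
  have bm1 := pvDigitBounds m1 (hd m1 (hget1 ▸ List.getElem_mem (by omega : k1 < s.length)))
  have bm2 := pvDigitBounds m2 (hd m2 (List.mem_of_mem_drop hmem2))
  by_cases heq : (s[i]'hilt).toNat = m1.toNat
  · have hieq : s[i]'hilt = m1 := pvCharEq _ _ heq
    have hk1i : k1 ≤ i := by
      by_contra hlt
      push Not at hlt
      exact hmin1 i hlt hieq
    have hjdrop : s[j]'hjlt ∈ s.drop (k1 + 1) := by
      have hlt2 : j - (k1 + 1) < (s.drop (k1 + 1)).length := by simp; omega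
      have h : (s.drop (k1 + 1))[j - (k1 + 1)]'hlt2 = s[j]'hjlt := by
        rw [List.getElem_drop]; congr 1; omega
      rw [← h]; exact List.getElem_mem hlt2
    have hjle : (s[j]'hjlt).toNat ≤ m2.toNat := (pvCharLe _ _).mp (hmax2 _ hjdrop)
    omega
  · omega

-- the max over B's pair list equals the greedy pair's value
theorem pvMaxEq (s : List Char) (hd : ∀ c ∈ s, c.isDigit = true)
    (m1 m2 : Char) (k1 : Nat) (hk1 : k1 + 1 ≤ s.length - 1) (hs : 2 ≤ s.length)
    (hget1 : s[k1]'(by omega) = m1)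
    (hmin1 : ∀ j (hj : j < k1), s[j]'(by omega) ≠ m1)
    (hmax1 : ∀ c ∈ s.dropLast, c ≤ m1)
    (hmem2 : m2 ∈ s.drop (k1 + 1))
    (hmax2 : ∀ c ∈ s.drop (k1 + 1), c ≤ m2) :
    PySem.List.max? (pvPairVals s) (fun v => v)
      = some (((m1.toNat : Int) - 48) * 10 + ((m2.toNat : Int) - 48)) := by
  have hatt := pvAttained s hd m1 m2 k1 hk1 hs hget1 hmem2
  have hbnd := pvBound s hd m1 m2 k1 hk1 hs hget1 hmin1 hmax1 hmem2 hmax2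
  rcases hM : PySem.List.max? (pvPairVals s) (fun v => v) with _ | M
  · rw [(PySem.List.max?_eq_none_iff _ _).mp hM] at hatt
    simp at hatt
  · have h1 : M ≤ ((m1.toNat : Int) - 48) * 10 + ((m2.toNat : Int) - 48) :=
      hbnd M (PySem.List.max?_mem hM)
    have h2 : ((m1.toNat : Int) - 48) * 10 + ((m2.toNat : Int) - 48) ≤ M :=
      PySem.List.max?_isMax hM _ hatt
    exact congrArg some (le_antisymm h1 h2)

-- A's helper on a single-character line yields "0"
theorem pvSingle (c : Char) : pvFindLargest [c] 2 = "0" := by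
  have hrange : PySem.List.pyRange 0 2 1 = [0, 1] := by decide
  have h1 : PySem.List.slice [c] (some 0)
      (some ((([c] : List Char).length : Int) - (2 - 1 - 0))) = ([] : List Char) := by
    norm_num [pvSliceZero]
  have e1 : pvFlnLoop [c] 2 [0, 1] (0, []) = (0, []) := by
    rw [show pvFlnLoop [c] 2 [0, 1] (0, []) =
        (match PySem.List.max?
            (PySem.List.slice [c] (some 0) (some ((([c] : List Char).length : Int) - (2 - 1 - 0)))) (fun x => x) with
        | none => ((0 : Int), ([] : List Char))
        | some m =>
            pvFlnLoop [c] 2 [1]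
              (0 + ((PySem.List.index?
                  (PySem.List.slice [c] (some 0) (some ((([c] : List Char).length : Int) - (2 - 1 - 0)))) m).getD 0 : Nat) + 1,
               [] ++ [(PySem.List.pyGet?
                  (PySem.List.slice [c] (some 0) (some ((([c] : List Char).length : Int) - (2 - 1 - 0))))
                  (((PySem.List.index?
                    (PySem.List.slice [c] (some 0) (some ((([c] : List Char).length : Int) - (2 - 1 - 0)))) m).getD 0 : Nat) : Int)).getD ' '])) from rfl]
    rw [h1]
    rfl
  unfold pvFindLargest
  rw [hrange, e1]
  rfl

-- per-line equality
theorem pvLine (acc : Int) (line : String)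
    (h : (PySem.Str.strip line).toList.length ≤ 1 ∨
      (∀ c ∈ (PySem.Str.strip line).toList, c.isDigit = true)) :
    (if PySem.Str.strip line = "" then acc
     else acc + (PySem.Int.ofStr? (pvFindLargest (PySem.Str.strip line).toList 2)).getD 0)
    = (if (PySem.Str.strip line).toList.length < 2 then acc
       else acc + (PySem.List.max? (pvPairVals (PySem.Str.strip line).toList) (fun v => v)).getD 0) := by
  rcases Nat.lt_or_ge (PySem.Str.strip line).toList.length 2 with hlt | hge
  · rw [if_pos hlt]
    by_cases h0 : (PySem.Str.strip line).toList.length = 0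
    · have : PySem.Str.strip line = "" := by
        have he : (PySem.Str.strip line).toList = [] := List.length_eq_zero_iff.mp h0
        exact String.toList_inj.mp (by rw [he]; rfl)
      rw [if_pos this]
    · have h1 : (PySem.Str.strip line).toList.length = 1 := by omega
      obtain ⟨c, hc⟩ := List.length_eq_one_iff.mp h1
      have hne : PySem.Str.strip line ≠ "" := by
        intro hcon
        rw [hcon] at hc
        simp at hc
      rw [if_neg hne, hc, pvSingle,
        show PySem.Int.ofStr? "0" = some 0 from by decide]
      simp
  · have hne : PySem.Str.strip line ≠ "" := by
      intro hcon
      rw [hcon] at hge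
      simp at hge
    have hd : ∀ c ∈ (PySem.Str.strip line).toList, c.isDigit = true := by
      rcases h with h | h
      · omega
      · exact h
    rw [if_neg hne, if_neg (by omega)]
    obtain ⟨m1, m2, k1, hk1, hfl, hget1, hmin1, hmax1, hmem2, hmax2⟩ :=
      pvGreedy (PySem.Str.strip line).toList hge
    rw [hfl, pvMaxEq (PySem.Str.strip line).toList hd m1 m2 k1 hk1 hge hget1 hmin1 hmax1 hmem2 hmax2]
    have hd1 : m1.isDigit = true := hd m1 (hget1 ▸ List.getElem_mem (by omega : k1 < _))
    have hd2 : m2.isDigit = true := hd m2 (List.mem_of_mem_drop hmem2)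
    have hof : PySem.Int.ofStr? (String.ofList [m1, m2])
        = some (10 * ((m1.toNat : Int) - 48) + ((m2.toNat : Int) - 48)) := by
      rw [show PySem.Int.ofStr? (String.ofList [m1, m2]) = PySem.Int.ofChars? [m1, m2] by
        simp [PySem.Int.ofStr?]]
      exact pvOfChars2 m1 m2 hd1 hd2
    rw [hof]
    simp only [Option.getD_some]
    ring

-- ===== VERDICT (by name: the statement is the Claim_ definition above) =====
theorem part1_spec : Claim_equal_part1 := by
  intro p _hdom hpre
  unfold Spec_part1
  unfold Pre_part1 at hpre
  simp only [List.all_eq_true, Bool.or_eq_true, decide_eq_true_eq] at hpre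
  by_cases hp : p = ""
  · subst hp; decide
  · unfold part1 part1_alt
    rw [if_neg hp]
    apply PySem.List.foldl_congr_mem
    intro acc line hline
    exact pvLine acc line (by
      rcases hpre line hline with h | h
      · exact Or.inl h
      · exact Or.inr h)
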